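-- pv_equiv track=rewrite | github.com/AntonioMexD/Practica01 | secuencia.py | diferencia_unica
-- ===== SOURCE A (Python) =====
-- def diferencia_unica(secuencia):
--     """Determina si las diferencias entre números consecutivos son únicas."""
--     diferencias = set()
--     for i in range(1, len(secuencia)):
--         diferencia = abs(secuencia[i] - secuencia[i-1])
--         if diferencia in diferencias:
--             return "NO"
--         diferencias.add(diferencia)
--     return "SI"
-- ===== SOURCE B (Python) =====
-- def diferencia_unica(secuencia):
--     """Determina si las diferencias entre números consecutivos son únicas."""
--     diffs = sorted(abs(b - a) for a, b in zip(secuencia, secuencia[1:]))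
--     if any(x == y for x, y in zip(diffs, diffs[1:])):
--         return "NO"
--     return "SI"
-- ===== Notes on version B (the rewrite author's own statement) =====
-- stated objective: alternative
-- what changed: Replaces A's index loop with an incremental seen-set and early return by a sort-based uniqueness check: build the consecutive absolute differences by zipping the sequence with its own tail, sort them, and report NO exactly when two adjacent sorted values are equal (duplicates in a sorted list are adjacent).
import Mathlib
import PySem

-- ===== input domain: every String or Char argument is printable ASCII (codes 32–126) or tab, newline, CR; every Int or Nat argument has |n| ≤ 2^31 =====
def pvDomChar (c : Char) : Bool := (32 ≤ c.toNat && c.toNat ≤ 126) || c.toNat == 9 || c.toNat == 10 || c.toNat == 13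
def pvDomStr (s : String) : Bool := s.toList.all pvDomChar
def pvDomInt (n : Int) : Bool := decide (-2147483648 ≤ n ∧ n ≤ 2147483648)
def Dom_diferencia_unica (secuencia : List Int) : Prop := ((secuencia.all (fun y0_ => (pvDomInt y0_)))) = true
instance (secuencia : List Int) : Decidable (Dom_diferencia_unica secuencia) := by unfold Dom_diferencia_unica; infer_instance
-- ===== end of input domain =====

-- B replaces A's seen-set loop with early return by a sort-based uniqueness check:
-- zip the sequence with its tail for the differences, sort, look for an adjacent equal pair.

-- ===== PORT A =====
-- the for-loop with early return, as structural recursion on the index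
def diferencia_unica_go (secuencia : List Int) (i : Nat) (diferencias : PySem.Set Int) : String :=
  if i < secuencia.length then
    let diferencia : Int := |secuencia.getD i 0 - secuencia.getD (i - 1) 0|
    if PySem.Set.contains diferencias diferencia then "NO"
    else diferencia_unica_go secuencia (i + 1) (PySem.Set.add diferencias diferencia)
  else "SI"
termination_by secuencia.length - i

def diferencia_unica (secuencia : List Int) : String :=
  diferencia_unica_go secuencia 1 PySem.Set.empty

-- ===== PORT B =====
def diferencia_unica_alt (secuencia : List Int) : String :=
  let diffs : List Int :=
    PySem.List.sorted
      ((secuencia.zip (PySem.List.slice secuencia (some 1) none)).map (fun p => |p.2 - p.1|))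
      (fun x => x) false
  if (diffs.zip (PySem.List.slice diffs (some 1) none)).any (fun p => p.1 == p.2) then "NO"
  else "SI"

-- ===== PRECONDITION & SPEC =====
def Spec_diferencia_unica (secuencia : List Int) (out : String) : Prop := out = diferencia_unica_alt secuencia
instance (secuencia : List Int) (out : String) : Decidable (Spec_diferencia_unica secuencia out) := by unfold Spec_diferencia_unica; infer_instance

-- ===== CLAIM =====
def Claim_equal_diferencia_unica : Prop := ∀ (secuencia : List Int), Dom_diferencia_unica secuencia → Spec_diferencia_unica secuencia (diferencia_unica secuencia)

-- ===== LEMMAS AND PROOFS =====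

-- abstract form of A's loop: scan a list of differences with a seen-set
def pvScan : List Int → PySem.Set Int → String
  | [], _ => "SI"
  | d :: ds, seen =>
    if PySem.Set.contains seen d then "NO" else pvScan ds (PySem.Set.add seen d)

-- A's scan answers "SI" iff the differences are distinct and disjoint from the seen-set
theorem pv_scan_eq (ds : List Int) (seen : PySem.Set Int) :
    pvScan ds seen = if ds.Nodup ∧ ∀ d ∈ ds, d ∉ seen then "SI" else "NO" := by
  induction ds generalizing seen with
  | nil => simp [pvScan]
  | cons d ds ih =>
      by_cases hc : PySem.Set.contains seen d = true
      · have hmem : d ∈ seen := by simpa using hc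
        simp only [pvScan, hc, if_pos]
        rw [if_neg]
        rintro ⟨-, hall⟩
        exact hall d (by simp) hmem
      · have hmem : d ∉ seen := by simpa using hc
        simp only [pvScan, hc, Bool.false_eq_true, if_false]
        rw [ih]
        congr 1
        simp only [eq_iff_iff, List.nodup_cons, List.mem_cons, PySem.Set.mem_add]
        constructor
        · rintro ⟨hnd, hall⟩
          refine ⟨⟨fun hd => hall d hd (Or.inr rfl), hnd⟩, ?_⟩
          rintro e (rfl | he)
          · exact hmem
          · exact fun hs => hall e he (Or.inl hs)
        · rintro ⟨⟨hdn, hnd⟩, hall⟩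
          refine ⟨hnd, fun e he hes => ?_⟩
          rcases hes with hs | rfl
          · exact hall e (Or.inr he) hs
          · exact hdn he

-- A's index loop scans exactly the consecutive differences of the remaining suffix
theorem pv_go_eq_scan (s : List Int) (i : Nat) (hi : 1 ≤ i) (seen : PySem.Set Int) :
    diferencia_unica_go s i seen =
      pvScan (((s.drop (i - 1)).zip (s.drop i)).map (fun p => |p.2 - p.1|)) seen := by
  by_cases h : i < s.length
  · have h1 : i - 1 < s.length := by omega
    have hd1 : s.drop (i - 1) = s[i - 1] :: s.drop ((i - 1) + 1) := List.drop_eq_getElem_cons h1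
    have hd2 : s.drop i = s[i] :: s.drop (i + 1) := List.drop_eq_getElem_cons h
    have hi1 : (i - 1) + 1 = i := by omega
    rw [diferencia_unica_go, if_pos h, hd1, hd2, hi1]
    simp only [List.zip_cons_cons, List.map_cons, pvScan]
    have hg1 : s.getD i 0 = s[i] := List.getD_eq_getElem s 0 h
    have hg2 : s.getD (i - 1) 0 = s[i - 1] := List.getD_eq_getElem s 0 h1
    rw [hg1, hg2]
    by_cases hc : PySem.Set.contains seen (|s[i] - s[i - 1]|) = true
    · rw [if_pos hc, if_pos hc]
    · rw [if_neg hc, if_neg hc]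
      have := pv_go_eq_scan s (i + 1) (by omega) (PySem.Set.add seen (|s[i] - s[i - 1]|))
      rw [this, Nat.add_sub_cancel]
  · rw [diferencia_unica_go, if_neg h]
    have : s.drop i = [] := List.drop_eq_nil_of_le (by omega)
    rw [this]
    simp [pvScan]
termination_by s.length - i

-- in a ≤-sorted list, some adjacent pair is equal iff the list has a duplicate
theorem pv_adj_dup (xs : List Int) (h : xs.Pairwise (· ≤ ·)) :
    ((xs.zip xs.tail).any (fun p => p.1 == p.2) = true) ↔ ¬ xs.Nodup := by
  induction xs with
  | nil => simp
  | cons a t ih =>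
      cases t with
      | nil => simp
      | cons b u =>
          rcases List.pairwise_cons.mp h with ⟨hale, htail⟩
          have hab : a ≤ b := hale b (by simp)
          have hbu : ∀ x ∈ u, b ≤ x := fun x hx => (List.pairwise_cons.mp htail).1 x hx
          simp only [List.tail_cons] at ih ⊢
          simp only [List.zip_cons_cons, List.any_cons, Bool.or_eq_true,
            beq_iff_eq, List.nodup_cons]
          rw [ih htail]
          by_cases hq : a = b
          · subst hq; simp
          · have halt : a ∉ b :: u := by
              have hlt : a < b := lt_of_le_of_ne hab hq
              simp only [List.mem_cons]
              rintro (rfl | hx)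
              · exact hq rfl
              · exact absurd (lt_of_lt_of_le hlt (hbu a hx)) (lt_irrefl a)
            simp [hq, halt]

-- ===== VERDICT =====
theorem diferencia_unica_spec : Claim_equal_diferencia_unica := by
  intro s _
  unfold Spec_diferencia_unica diferencia_unica diferencia_unica_alt
  rw [pv_go_eq_scan s 1 (by omega) PySem.Set.empty, pv_scan_eq]
  simp only [PySem.List.slice_from_one, Nat.sub_self, List.drop_zero, List.drop_one]
  set ds : List Int := (s.zip s.tail).map (fun p => |p.2 - p.1|) with hds
  set sd : List Int := PySem.List.sorted ds (fun x => x) false with hsd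
  have hperm : sd.Perm ds := PySem.List.sorted_perm ds (fun x => x) false
  have hpw : sd.Pairwise (· ≤ ·) := by
    simpa using PySem.List.sorted_pairwise ds (fun x => x)
  have hadj := pv_adj_dup sd hpw
  have hnd : sd.Nodup ↔ ds.Nodup := hperm.nodup_iff
  by_cases hdup : ds.Nodup
  · rw [if_pos ⟨hdup, by simp [PySem.Set.empty]⟩]
    rw [if_neg (by rw [hadj, hnd]; exact fun hcon => hcon hdup)]
  · rw [if_neg (by rintro ⟨hn, -⟩; exact hdup hn)]
    rw [if_pos (hadj.mpr (fun hn => hdup (hnd.mp hn)))]
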